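-- pv_equiv track=rewrite | github.com/datapointchris/theme | analysis/experiments/neovim_highlight_extractor.py | resolve_links
-- ===== SOURCE A (Python) =====
-- def resolve_links(highlights: dict, group_name: str, visited: set = None) -> dict | None:
--     """Resolve linked highlight groups to get actual colors."""
--     if visited is None:
--         visited = set()
--
--     if group_name in visited:
--         return None  # Circular link
--
--     visited.add(group_name)
--
--     if group_name not in highlights:
--         return None
--
--     hl = highlights[group_name]
--     if hl.get("link"):
--         return resolve_links(highlights, hl["link"], visited)
--
--     return hl
-- ===== SOURCE B (Python) =====
-- def resolve_links(highlights: dict, group_name: str, visited: set = None) -> dict | None: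
--     """Resolve linked highlight groups to get actual colors (iterative)."""
--     if visited is None:
--         visited = set()
--     while True:
--         if group_name in visited:
--             return None  # Circular link
--         visited.add(group_name)
--         if group_name not in highlights:
--             return None
--         hl = highlights[group_name]
--         link = hl.get("link")
--         if link:
--             group_name = link
--         else:
--             return hl
-- ===== Notes on version B (the rewrite author's own statement) =====
-- stated objective: simpler
-- what changed: Replaces the tail recursion with an explicit while-True loop that rebinds group_name and mutates the same visited set, so no call stack is built.
import Mathlib
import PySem

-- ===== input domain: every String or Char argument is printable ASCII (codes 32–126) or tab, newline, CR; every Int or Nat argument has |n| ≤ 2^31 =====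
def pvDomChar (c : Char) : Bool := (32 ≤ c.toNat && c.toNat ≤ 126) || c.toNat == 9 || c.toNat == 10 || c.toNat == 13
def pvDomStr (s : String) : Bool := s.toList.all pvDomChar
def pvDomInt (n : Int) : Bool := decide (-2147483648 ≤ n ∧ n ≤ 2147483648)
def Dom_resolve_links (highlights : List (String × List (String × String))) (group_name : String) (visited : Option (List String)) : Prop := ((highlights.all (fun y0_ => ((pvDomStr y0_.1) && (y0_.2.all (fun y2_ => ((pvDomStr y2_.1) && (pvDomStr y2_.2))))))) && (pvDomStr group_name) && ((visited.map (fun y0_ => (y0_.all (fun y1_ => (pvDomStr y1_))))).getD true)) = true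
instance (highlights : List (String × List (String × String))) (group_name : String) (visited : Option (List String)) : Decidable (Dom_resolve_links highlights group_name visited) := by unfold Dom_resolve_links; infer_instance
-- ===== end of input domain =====

-- B replaces A's tail recursion by an explicit while-True loop (simpler: no call stack);
-- equivalence is about the RETURN value only — both A and B mutate the caller-passed
-- `visited` set identically.

-- ===== PORT A =====
-- A's recursion; fuel (= |highlights| + 1) only makes the recursion total: each
-- recursive call adds a fresh key of `highlights` to `visited`, so Python's
-- recursion depth never exceeds the number of keys.
def resolveLinksGo (highlights : List (String × List (String × String))) : Nat → String → PySem.Set String → Option (List (String × String))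
  | 0, _, _ => none
  | fuel + 1, group_name, visited =>
    if PySem.Set.contains visited group_name then none  -- Circular link
    else
      let visited := PySem.Set.add visited group_name
      match (PySem.Dict.mk highlights).get? group_name with
      | none => none
      | some hl =>
        match (PySem.Dict.mk hl).get? "link" with
        | some link =>
          if link ≠ "" then resolveLinksGo highlights fuel link visited
          else some hl
        | none => some hl

def resolve_links (highlights : List (String × List (String × String))) (group_name : String) (visited : Option (List String)) : Option (List (String × String)) :=
  resolveLinksGo highlights (highlights.length + 1) group_name (visited.getD PySem.Set.empty)

-- ===== PORT B =====
-- B's loop body: one iteration of the while-True loop, returning either the next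
-- state (.inl) or the final result (.inr).
def resolveLinksStep (highlights : List (String × List (String × String))) (st : String × PySem.Set String) : (String × PySem.Set String) ⊕ Option (List (String × String)) :=
  if PySem.Set.contains st.2 st.1 then .inr none
  else
    let visited := PySem.Set.add st.2 st.1
    match (PySem.Dict.mk highlights).get? st.1 with
    | none => .inr none
    | some hl =>
      match (PySem.Dict.mk hl).get? "link" with
      | some link =>
        if link ≠ "" then .inl (link, visited)
        else .inr (some hl)
      | none => .inr (some hl)

-- iterate the loop body; fuel (= |highlights| + 1) only makes the loop total (see above)
def resolveLinksLoop (highlights : List (String × List (String × String))) : Nat → String × PySem.Set String → Option (List (String × String))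
  | 0, _ => none
  | fuel + 1, st =>
    match resolveLinksStep highlights st with
    | .inl st' => resolveLinksLoop highlights fuel st'
    | .inr r => r

def resolve_links_alt (highlights : List (String × List (String × String))) (group_name : String) (visited : Option (List String)) : Option (List (String × String)) :=
  resolveLinksLoop highlights (highlights.length + 1) (group_name, visited.getD PySem.Set.empty)

-- ===== PRECONDITION & SPEC =====
def Spec_resolve_links (highlights : List (String × List (String × String))) (group_name : String) (visited : Option (List String)) (out : Option (List (String × String))) : Prop := out = resolve_links_alt highlights group_name visited
instance (highlights : List (String × List (String × String))) (group_name : String) (visited : Option (List String)) (out : Option (List (String × String))) : Decidable (Spec_resolve_links highlights group_name visited out) := by unfold Spec_resolve_links; infer_instance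

-- ===== CLAIM (what is proved, stated in full; the proofs are below) =====
def Claim_equal_resolve_links : Prop := ∀ (highlights : List (String × List (String × String))) (group_name : String) (visited : Option (List String)), Dom_resolve_links highlights group_name visited → Spec_resolve_links highlights group_name visited (resolve_links highlights group_name visited)

-- ===== LEMMAS AND PROOFS =====
lemma go_eq_loop (highlights : List (String × List (String × String))) (fuel : Nat) (g : String) (v : PySem.Set String) :
    resolveLinksGo highlights fuel g v = resolveLinksLoop highlights fuel (g, v) := by
  induction fuel generalizing g v with
  | zero => rfl
  | succ fuel ih =>
    simp only [resolveLinksGo, resolveLinksLoop, resolveLinksStep]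
    split_ifs with h
    · rfl
    · cases hget : (PySem.Dict.mk highlights).get? g with
      | none => simp only [hget]
      | some hl =>
        simp only [hget]
        cases hlink : (PySem.Dict.mk hl).get? "link" with
        | none => simp only [hlink]
        | some link =>
          by_cases hl' : link = ""
          · simp [hlink, hl']
          · simp [hlink, hl', ih]

-- ===== VERDICT (by name: the statement is the Claim_ definition above) =====
theorem resolve_links_spec : Claim_equal_resolve_links := by
  intro highlights group_name visited _
  unfold Spec_resolve_links resolve_links resolve_links_alt
  exact go_eq_loop ..
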